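-- pv_equiv track=rewrite | github.com/vipongo/introductionToComputerSecuritySmallChallenges | pr4/encrypt_xor_with_changing_key_by_prev_cipher.py | encrypt_xor_with_changing_key_by_prev_cipher
-- ===== SOURCE A (Python) =====
-- def encrypt_xor_with_changing_key_by_prev_cipher(value, key, encryOrDecrypt):
--     """
--     >>> encrypt_xor_with_changing_key_by_prev_cipher('Hello',123,'encrypt')
--     '3V:V9'
--     >>> encrypt_xor_with_changing_key_by_prev_cipher(encrypt_xor_with_changing_key_by_prev_cipher('Hello',123,'encrypt'),123,'decrypt')
--     'Hello'
--     >>> encrypt_xor_with_changing_key_by_prev_cipher(encrypt_xor_with_changing_key_by_prev_cipher('Cryptography',10,'encrypt'),10,'decrypt')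
--     'Cryptography'
--     """
--     res = ""
--     if(encryOrDecrypt == "encrypt"):
--         result = key
--         for element in value:
--             charBin = ord(element)
--             result = (charBin ^ result)
--             result1 = chr(result)
--             res = res + result1
--         return res
--     else:
--         inverse = ""
--         for element in value:
--             inverse = element + inverse
--         result = ord(inverse[len(inverse)-1])
--         for element in inverse:
--             charBin = ord(element)
--             result = (charBin ^ result)
--             result1 = chr(result)
--             res = result1 + res
--             result = ord(element)
--         result = key
--         charBin = ord(element)
--         result = (charBin ^ result)
--         result1 = chr(result)
--         res = result1 + res
--         return res[:len(res)-1]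
-- ===== SOURCE B (Python) =====
-- def encrypt_xor_with_changing_key_by_prev_cipher(value, key, encryOrDecrypt):
--     # Single forward pass for both directions; side effects: none.
--     enc = (encryOrDecrypt == "encrypt")
--     prev = key
--     out = []
--     for c in value:
--         o = ord(c) ^ prev
--         out.append(chr(o))
--         prev = o if enc else ord(c)
--     return ''.join(out)
-- ===== Notes on version B (the rewrite author's own statement) =====
-- stated objective: simpler
-- what changed: Replaces A's two dissimilar branches (forward fold for encrypt; reverse the string, a backward prepending pass, an extra post-loop step and a final slice for decrypt) by one single forward pass whose only branch is which value becomes the next key (cipher char for encrypt, plain char for decrypt), accumulated in a list and joined once.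
-- crash fix: On decrypt (any encryOrDecrypt != 'encrypt') of the empty string A raises IndexError via inverse[len(inverse)-1]; B returns ''. — e.g. on encrypt_xor_with_changing_key_by_prev_cipher("", 5, "decrypt"): A raises IndexError, B returns ""
import Mathlib
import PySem

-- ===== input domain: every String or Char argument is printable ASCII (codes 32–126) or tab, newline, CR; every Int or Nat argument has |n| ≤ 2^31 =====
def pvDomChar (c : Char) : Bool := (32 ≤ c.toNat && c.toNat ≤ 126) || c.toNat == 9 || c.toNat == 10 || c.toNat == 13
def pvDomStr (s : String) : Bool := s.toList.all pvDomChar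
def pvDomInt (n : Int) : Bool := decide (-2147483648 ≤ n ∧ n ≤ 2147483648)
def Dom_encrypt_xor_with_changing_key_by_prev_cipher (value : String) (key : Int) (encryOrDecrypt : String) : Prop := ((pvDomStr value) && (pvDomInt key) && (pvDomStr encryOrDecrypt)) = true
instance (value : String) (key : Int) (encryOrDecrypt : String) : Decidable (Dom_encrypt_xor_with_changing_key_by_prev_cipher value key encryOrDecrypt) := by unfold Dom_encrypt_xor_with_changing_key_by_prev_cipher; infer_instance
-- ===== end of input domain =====

-- B replaces A's two dissimilar branches (and the contorted reversed decrypt pass) by one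
-- forward pass that only differs in which value becomes the next key. Return-value equivalence;
-- neither function mutates its arguments.

-- ===== PORT A =====
def encrypt_xor_with_changing_key_by_prev_cipher (value : String) (key : Int) (encryOrDecrypt : String) : String :=
  if encryOrDecrypt == "encrypt" then
    -- res = ""; result = key; for element in value: result = ord(element) ^ result; res = res + chr(result)
    let st := value.toList.foldl
      (fun (p : List Char × Int) element =>
        let charBin : Int := element.toNat
        let result := PySem.Int.bxor charBin p.2
        let result1 := Char.ofNat result.toNat
        (p.1 ++ [result1], result)) ([], key)
    String.mk st.1
  else
    -- inverse = ""; for element in value: inverse = element + inverse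
    let inverse := value.toList.foldl (fun inv element => element :: inv) ([] : List Char)
    -- result = ord(inverse[len(inverse)-1]); Python raises IndexError iff inverse = [] (excluded by Pre_);
    -- the default 'a' is never reached under Pre_
    let result0 : Int := (inverse.getD (inverse.length - 1) 'a').toNat
    -- loop: result = ord(element) ^ result; res = chr(result) + res; result = ord(element)
    -- state also tracks the Python loop variable 'element' (read after the loop); default never reached under Pre_
    let st := inverse.foldl
      (fun (p : List Char × Int × Char) element =>
        let charBin : Int := element.toNat
        let result := PySem.Int.bxor charBin p.2.1
        let result1 := Char.ofNat result.toNat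
        (result1 :: p.1, ((element.toNat : Int), element))) ([], ((result0, 'a') : Int × Char))
    let element := st.2.2
    let result := PySem.Int.bxor (element.toNat : Int) key
    let res := Char.ofNat result.toNat :: st.1
    -- res[:len(res)-1] drops the final character: List.dropLast (exact, res is nonempty here)
    String.mk res.dropLast

-- ===== PORT B =====
def pvGo (enc : Bool) (prev : Int) : List Char → List Char
  | [] => []
  | c :: rest =>
    let o := PySem.Int.bxor (c.toNat : Int) prev
    Char.ofNat o.toNat :: pvGo enc (if enc then o else (c.toNat : Int)) rest

def encrypt_xor_with_changing_key_by_prev_cipher_alt (value : String) (key : Int) (encryOrDecrypt : String) : String :=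
  String.mk (pvGo (encryOrDecrypt == "encrypt") key value.toList)

-- ===== PRECONDITION & SPEC =====
-- Pre_ excludes (a) decrypt of the empty string, where A raises IndexError; (b) nonempty inputs with
-- key < 0 or key ≥ 0x110000, where chr() raises ValueError in both A and B; and (c) keys in the UTF-16
-- surrogate band [0xD800, 0xE000), where A returns a string containing a lone surrogate code point,
-- which is not representable as a Lean Char/String (B returns the identical Python string there).
def Pre_encrypt_xor_with_changing_key_by_prev_cipher (value : String) (key : Int) (encryOrDecrypt : String) : Prop :=
  (value = "" → encryOrDecrypt = "encrypt") ∧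
  (value ≠ "" → 0 ≤ key ∧ key < 1114112 ∧ ¬ (55296 ≤ key ∧ key < 57344))
instance (value : String) (key : Int) (encryOrDecrypt : String) : Decidable (Pre_encrypt_xor_with_changing_key_by_prev_cipher value key encryOrDecrypt) := by unfold Pre_encrypt_xor_with_changing_key_by_prev_cipher; infer_instance

def pvWitness_encrypt_xor_with_changing_key_by_prev_cipher : String × Int × String := ("Hello", 123, "encrypt")

-- On decrypt (any encryOrDecrypt ≠ "encrypt") of the empty string A raises IndexError via inverse[len(inverse)-1]; B returns "".
def Raises_encrypt_xor_with_changing_key_by_prev_cipher (value : String) (key : Int) (encryOrDecrypt : String) : Prop :=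
  value = "" ∧ encryOrDecrypt ≠ "encrypt"
instance (value : String) (key : Int) (encryOrDecrypt : String) : Decidable (Raises_encrypt_xor_with_changing_key_by_prev_cipher value key encryOrDecrypt) := by unfold Raises_encrypt_xor_with_changing_key_by_prev_cipher; infer_instance
def pvRaiseWitness_encrypt_xor_with_changing_key_by_prev_cipher : String × Int × String := ("", 5, "decrypt")
def pvRaiseWitnessOut_encrypt_xor_with_changing_key_by_prev_cipher : String := ""

def Spec_encrypt_xor_with_changing_key_by_prev_cipher (value : String) (key : Int) (encryOrDecrypt : String) (out : String) : Prop := out = encrypt_xor_with_changing_key_by_prev_cipher_alt value key encryOrDecrypt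
instance (value : String) (key : Int) (encryOrDecrypt : String) (out : String) : Decidable (Spec_encrypt_xor_with_changing_key_by_prev_cipher value key encryOrDecrypt out) := by unfold Spec_encrypt_xor_with_changing_key_by_prev_cipher; infer_instance

-- ===== CLAIM (what is proved, stated in full; the proofs are below) =====
def Claim_equal_encrypt_xor_with_changing_key_by_prev_cipher : Prop := ∀ (value : String) (key : Int) (encryOrDecrypt : String), Dom_encrypt_xor_with_changing_key_by_prev_cipher value key encryOrDecrypt → Pre_encrypt_xor_with_changing_key_by_prev_cipher value key encryOrDecrypt → Spec_encrypt_xor_with_changing_key_by_prev_cipher value key encryOrDecrypt (encrypt_xor_with_changing_key_by_prev_cipher value key encryOrDecrypt)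

def Claim_raises_encrypt_xor_with_changing_key_by_prev_cipher : Prop := (∀ (value : String) (key : Int) (encryOrDecrypt : String), Dom_encrypt_xor_with_changing_key_by_prev_cipher value key encryOrDecrypt → Raises_encrypt_xor_with_changing_key_by_prev_cipher value key encryOrDecrypt → ¬ Pre_encrypt_xor_with_changing_key_by_prev_cipher value key encryOrDecrypt) ∧ (Dom_encrypt_xor_with_changing_key_by_prev_cipher (pvRaiseWitness_encrypt_xor_with_changing_key_by_prev_cipher.1) (pvRaiseWitness_encrypt_xor_with_changing_key_by_prev_cipher.2.1) (pvRaiseWitness_encrypt_xor_with_changing_key_by_prev_cipher.2.2) ∧ Raises_encrypt_xor_with_changing_key_by_prev_cipher (pvRaiseWitness_encrypt_xor_with_changing_key_by_prev_cipher.1) (pvRaiseWitness_encrypt_xor_with_changing_key_by_prev_cipher.2.1) (pvRaiseWitness_encrypt_xor_with_changing_key_by_prev_cipher.2.2) ∧ encrypt_xor_with_changing_key_by_prev_cipher_alt (pvRaiseWitness_encrypt_xor_with_changing_key_by_prev_cipher.1) (pvRaiseWitness_encrypt_xor_with_changing_key_by_prev_cipher.2.1) (pvRaiseWitness_encrypt_xor_with_changing_key_by_prev_cipher.2.2)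 = pvRaiseWitnessOut_encrypt_xor_with_changing_key_by_prev_cipher)

-- ===== LEMMAS AND PROOFS =====

-- A's encrypt loop with accumulator (res, result) equals B's pass with enc = true.
theorem pvEncFold (l : List Char) (res : List Char) (r : Int) :
    (l.foldl
      (fun (p : List Char × Int) element =>
        (p.1 ++ [Char.ofNat (PySem.Int.bxor (element.toNat : Int) p.2).toNat],
         PySem.Int.bxor (element.toNat : Int) p.2)) (res, r)).1 = res ++ pvGo true r l := by
  induction l generalizing res r with
  | nil => simp [pvGo]
  | cons c rest ih => simp [List.foldl_cons, pvGo, ih]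

-- head code of a list, defaulting to r
def pvHeadCode (l : List Char) (r : Int) : Int :=
  match l with
  | [] => r
  | c :: _ => (c.toNat : Int)

-- the char list A's decrypt loop builds (prepending ⇒ stated in l's order via foldr)
def pvF (l : List Char) (r : Int) : List Char :=
  match l with
  | [] => []
  | c :: rest => Char.ofNat (PySem.Int.bxor (c.toNat : Int) (pvHeadCode rest r)).toNat :: pvF rest r

theorem pvDecFold (l : List Char) (r : Int) (d : Char) :
    (l.foldr
      (fun element (p : List Char × Int × Char) =>
        (Char.ofNat (PySem.Int.bxor (element.toNat : Int) p.2.1).toNat :: p.1,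
         ((element.toNat : Int), element))) ([], (r, d))) =
    (pvF l r, (pvHeadCode l r, match l with | [] => d | c :: _ => c)) := by
  induction l with
  | nil => simp [pvF, pvHeadCode]
  | cons c rest ih => simp [List.foldr_cons, ih, pvF, pvHeadCode]

theorem pvDropF (rest : List Char) (c : Char) (r : Int) :
    (pvF (c :: rest) r).dropLast = pvGo false (c.toNat : Int) rest := by
  induction rest generalizing c with
  | nil => simp [pvF, pvGo]
  | cons c1 rest' ih =>
    show (Char.ofNat (PySem.Int.bxor (c.toNat : Int) (pvHeadCode (c1 :: rest') r)).toNat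
        :: pvF (c1 :: rest') r).dropLast = _
    rw [List.dropLast_cons_of_ne_nil (by simp [pvF])]
    simp only [pvGo, ih, pvHeadCode]
    rw [PySem.Int.bxor_comm]
    simp

theorem pvRevFold (l : List Char) (acc : List Char) :
    l.foldl (fun inv element => element :: inv) acc = l.reverse ++ acc := by
  induction l generalizing acc with
  | nil => simp
  | cons c rest ih => simp [List.foldl_cons, ih]

-- ===== VERDICT (by name: the statement is the Claim_ definition above) =====
theorem encrypt_xor_with_changing_key_by_prev_cipher_spec : Claim_equal_encrypt_xor_with_changing_key_by_prev_cipher := by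
  intro value key encryOrDecrypt _ hpre
  unfold Spec_encrypt_xor_with_changing_key_by_prev_cipher
  unfold encrypt_xor_with_changing_key_by_prev_cipher encrypt_xor_with_changing_key_by_prev_cipher_alt
  by_cases hm : (encryOrDecrypt == "encrypt") = true
  · simp only [hm, if_true]
    rw [pvEncFold value.toList [] key]
    simp
  · have hm' : (encryOrDecrypt == "encrypt") = false := by simpa using hm
    have hv : value ≠ "" := fun hv0 => by simp [hpre.1 hv0] at hm'
    simp only [hm', Bool.false_eq_true, if_false]
    obtain ⟨c, rest, hl⟩ : ∃ c rest, value.toList = c :: rest := by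
      cases hcl : value.toList with
      | nil => exact absurd (String.toList_eq_nil_iff.mp hcl) hv
      | cons c rest => exact ⟨c, rest, rfl⟩
    rw [pvRevFold value.toList [], List.append_nil, List.foldl_reverse, hl]
    rw [pvDecFold (c :: rest) _ 'a']
    rw [List.dropLast_cons_of_ne_nil (by simp [pvF]), pvDropF, pvGo]
    simp

theorem encrypt_xor_with_changing_key_by_prev_cipher_raises : Claim_raises_encrypt_xor_with_changing_key_by_prev_cipher := by
  unfold Claim_raises_encrypt_xor_with_changing_key_by_prev_cipher
  refine ⟨?_, by decide⟩
  intro value key encryOrDecrypt _ hr hp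
  exact hr.2 (hp.1 hr.1)

-- self-check: the raise witness itself lies outside Pre_ (instance of the raises theorem's first half)
theorem pvRaiseWitness_ok : ¬ Pre_encrypt_xor_with_changing_key_by_prev_cipher "" 5 "decrypt" :=
  encrypt_xor_with_changing_key_by_prev_cipher_raises.1 "" 5 "decrypt" (by decide) (by decide)
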